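-- pv_equiv track=rewrite | github.com/stacy-lee/Data-Mining | DecisionTree.py | count
-- ===== SOURCE A (Python) =====
-- def count(name, value, target_label, labels):
--     """
--     Returns a dictionary with the all the attributes and a count of their unique values
--     """
--     dictionary = {}
--     for att in name[0]:
--         dictionary[att] = {}
--     for idx, label in enumerate(labels):
--         for col in range(len(name[idx])):
--             if not value[idx][col] in dictionary[name[idx][col]]:
--                 dictionary[name[idx][col]][value[idx][col]] = 0
--             if label==target_label:
--                 dictionary[name[idx][col]][value[idx][col]] += 1
--     return dictionary
-- ===== SOURCE B (Python) =====
-- def count(name, value, target_label, labels):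
--     """
--     Returns a dictionary with all the attributes and a count of their unique values.
--     Group-by decomposition: flatten the table once into (attribute, value, is_target)
--     cells, then build each attribute's sub-dictionary independently from the flat list.
--     """
--     cells = [(name[i][c], value[i][c], lab == target_label)
--              for i, lab in enumerate(labels)
--              for c in range(len(name[i]))]
--     return {att: _tally(cells, att) for att in name[0]}
--
--
-- def _tally(cells, att):
--     d = {}
--     for a, v, t in cells:
--         if a == att:
--             d[v] = d.get(v, 0) + t
--     return d
-- ===== Notes on version B (the rewrite author's own statement) =====
-- stated objective: alternative
-- what changed: A threads one shared dict-of-dicts through a fused row-major loop that registers and conditionally increments each cell; B flattens the table once into (attribute, value, is_target) cells and then builds each attribute's sub-dictionary independently by a group-by tally over the flat cell list, with no shared mutable state.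
import Mathlib
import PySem

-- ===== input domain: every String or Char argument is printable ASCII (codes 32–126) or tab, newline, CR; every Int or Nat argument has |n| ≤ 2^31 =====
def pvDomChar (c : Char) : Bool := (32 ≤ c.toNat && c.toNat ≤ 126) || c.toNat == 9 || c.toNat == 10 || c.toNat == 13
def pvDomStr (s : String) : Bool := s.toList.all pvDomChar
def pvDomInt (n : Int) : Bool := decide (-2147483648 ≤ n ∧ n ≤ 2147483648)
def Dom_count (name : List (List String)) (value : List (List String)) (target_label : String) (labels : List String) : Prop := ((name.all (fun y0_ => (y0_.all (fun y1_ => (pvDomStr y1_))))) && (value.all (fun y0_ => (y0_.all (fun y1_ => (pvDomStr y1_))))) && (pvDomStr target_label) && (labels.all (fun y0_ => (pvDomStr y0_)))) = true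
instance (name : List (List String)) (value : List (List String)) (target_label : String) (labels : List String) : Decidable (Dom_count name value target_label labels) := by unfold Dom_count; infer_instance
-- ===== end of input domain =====

-- B replaces A's fused loop over one shared dict-of-dicts by a group-by decomposition:
-- flatten the table once into (attribute, value, is_target) cells, then build each
-- attribute's sub-dictionary independently by tallying the flat cell list (alternative, same-order result).


-- ===== PORT A =====
-- literal port of A: one fused loop; dictionary[att] lookups (KeyError in Python) and row
-- indexing (IndexError) are ported with getD defaults — exact on Pre_count, which excludes the raising inputs
def count (name : List (List String)) (value : List (List String)) (target_label : String) (labels : List String) : List (String × List (String × Int)) :=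
  let d0 : PySem.Dict String (PySem.Dict String Int) :=
    (PySem.List.pyGetD name 0 []).foldl (fun d att => d.insert att PySem.Dict.empty) PySem.Dict.empty
  let dfin := (PySem.List.enumerate labels 0).foldl (fun d p =>
    let row := PySem.List.pyGetD name p.1 []
    let vrow := PySem.List.pyGetD value p.1 []
    (PySem.List.pyRange 0 (row.length : Int) 1).foldl (fun d col =>
      let att := PySem.List.pyGetD row col ""
      let v := PySem.List.pyGetD vrow col ""
      let inner := d.getD att PySem.Dict.empty
      let d1 := if inner.contains v then d else d.insert att (inner.insert v 0)
      if p.2 == target_label then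
        let inner1 := d1.getD att PySem.Dict.empty
        d1.insert att (inner1.insert v (inner1.getD v 0 + 1))
      else d1) d) d0
  dfin.items.map (fun q => (q.1, q.2.items))

-- ===== PORT B =====
-- the flat cell list [(name[i][c], value[i][c], lab == target_label) …] of Source B
def countCells (name : List (List String)) (value : List (List String)) (target_label : String) (labels : List String) : List (String × String × Bool) :=
  (PySem.List.enumerate labels 0).flatMap (fun p =>
    (PySem.List.pyRange 0 ((PySem.List.pyGetD name p.1 []).length : Int) 1).map (fun c =>
      (PySem.List.pyGetD (PySem.List.pyGetD name p.1 []) c "",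
       PySem.List.pyGetD (PySem.List.pyGetD value p.1 []) c "",
       p.2 == target_label)))

-- _tally of Source B: one attribute's sub-dictionary from the flat cell list (True counts as 1)
def tally (cells : List (String × String × Bool)) (att : String) : PySem.Dict String Int :=
  cells.foldl (fun d c =>
    if c.1 == att then d.insert c.2.1 (d.getD c.2.1 0 + (if c.2.2 then 1 else 0)) else d)
    PySem.Dict.empty

def count_alt (name : List (List String)) (value : List (List String)) (target_label : String) (labels : List String) : List (String × List (String × Int)) :=
  let cells := countCells name value target_label labels
  let d := (PySem.List.pyGetD name 0 []).foldl
    (fun d att => d.insert att (tally cells att)) PySem.Dict.empty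
  d.items.map (fun q => (q.1, q.2.items))

-- ===== PRECONDITION & SPEC =====
-- Pre_count = exactly the inputs where Python A returns: name[0] exists, every labelled row index
-- is a valid name row, value rows are long enough wherever a cell is read, and every attribute
-- cell is a key of the initial dictionary (else KeyError).
def Pre_count (name : List (List String)) (value : List (List String)) (target_label : String) (labels : List String) : Prop :=
  name ≠ [] ∧
  ∀ i, i < labels.length →
    i < name.length ∧
    ((name.getD i []) ≠ [] → i < value.length ∧ (name.getD i []).length ≤ (value.getD i []).length) ∧
    ∀ a ∈ name.getD i [], a ∈ name.headD []
instance (name : List (List String)) (value : List (List String)) (target_label : String) (labels : List String) : Decidable (Pre_count name value target_label labels) := by unfold Pre_count; infer_instance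

def pvWitness_count : List (List String) × List (List String) × String × List String :=
  ([["a", "b"], ["a", "b"]], [["x", "y"], ["x", "z"]], "yes", ["yes", "no"])

def Spec_count (name : List (List String)) (value : List (List String)) (target_label : String) (labels : List String) (out : List (String × List (String × Int))) : Prop := out = count_alt name value target_label labels
instance (name : List (List String)) (value : List (List String)) (target_label : String) (labels : List String) (out : List (String × List (String × Int))) : Decidable (Spec_count name value target_label labels out) := by unfold Spec_count; infer_instance

-- ===== CLAIM (what is proved, stated in full; the proofs are below) =====
def Claim_equal_count : Prop := ∀ (name : List (List String)) (value : List (List String)) (target_label : String) (labels : List String), Dom_count name value target_label labels → Pre_count name value target_label labels → Spec_count name value target_label labels (count name value target_label labels)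

-- ===== LEMMAS AND PROOFS =====

abbrev DD := PySem.Dict String (PySem.Dict String Int)

-- A's per-cell action on one inner dict (register then conditionally increment)
def innerA (s : PySem.Dict String Int) (c : String × Bool) : PySem.Dict String Int :=
  let s1 := if s.contains c.1 then s else s.insert c.1 0
  if c.2 then s1.insert c.1 (s1.getD c.1 0 + 1) else s1

-- B's per-cell action on one inner dict (d[v] = d.get(v,0) + t)
def innerB (s : PySem.Dict String Int) (c : String × Bool) : PySem.Dict String Int :=
  s.insert c.1 (s.getD c.1 0 + (if c.2 then 1 else 0))

-- A's raw per-cell step on the outer dict, and its always-insert normal form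
def rawA (d : DD) (c : String × String × Bool) : DD :=
  let inner := d.getD c.1 PySem.Dict.empty
  let d1 := if inner.contains c.2.1 then d else d.insert c.1 (inner.insert c.2.1 0)
  if c.2.2 then
    let inner1 := d1.getD c.1 PySem.Dict.empty
    d1.insert c.1 (inner1.insert c.2.1 (inner1.getD c.2.1 0 + 1))
  else d1

def normA (d : DD) (c : String × String × Bool) : DD :=
  d.insert c.1 (innerA (d.getD c.1 PySem.Dict.empty) c.2)

def DInv (d : DD) : Prop := d.keys.Nodup ∧ ∀ s ∈ d.values, s.keys.Nodup

theorem insert_getD_self_of_contains {κ ν : Type} [BEq κ] [LawfulBEq κ]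
    (d : PySem.Dict κ ν) (k : κ) (dflt : ν) (h : d.contains k = true)
    (hnd : d.keys.Nodup) : d.insert k (d.getD k dflt) = d := by
  apply PySem.Dict.ext
  rw [PySem.Dict.items_insert_of_contains _ _ h]
  conv_rhs => rw [← List.map_id d.items]
  apply List.map_congr_left
  intro p hp
  by_cases hk : p.1 = k
  · have hp' : (p.1, p.2) ∈ d.items := by simpa using hp
    have hg : d.getD k dflt = p.2 := by
      subst hk
      exact PySem.Dict.getD_of_mem_items d hp' hnd dflt
    subst hk
    simp [hg]
  · simp [hk]

theorem inner_eq (s : PySem.Dict String Int) (c : String × Bool)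
    (hnd : s.keys.Nodup) : innerA s c = innerB s c := by
  rcases c with ⟨v, t⟩
  unfold innerA innerB
  cases hc : s.contains v
  · cases t
    · simp only [Bool.false_eq_true, if_false]
      rw [PySem.Dict.getD_of_not_contains _ _ hc]
      norm_num
    · simp only [Bool.false_eq_true, if_false, if_true]
      rw [PySem.Dict.insert_insert_self, PySem.Dict.getD_insert_self,
          PySem.Dict.getD_of_not_contains _ _ hc]
  · cases t
    · simp only [Bool.false_eq_true, if_false, if_true]
      rw [add_zero, insert_getD_self_of_contains s v 0 hc hnd]
    · simp only [if_true]

theorem innerA_nodup (s : PySem.Dict String Int) (c : String × Bool)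
    (hnd : s.keys.Nodup) : (innerA s c).keys.Nodup := by
  unfold innerA
  cases hc : s.contains c.1 <;> cases ht : c.2 <;>
    simp only [Bool.false_eq_true, if_false, if_true] <;>
    first
      | exact hnd
      | exact PySem.Dict.nodup_keys_insert _ _ _ hnd
      | exact PySem.Dict.nodup_keys_insert _ _ _ (PySem.Dict.nodup_keys_insert _ _ _ hnd)

theorem getD_nodup {d : DD} (h : DInv d) (k : String) :
    (d.getD k PySem.Dict.empty).keys.Nodup := by
  rw [PySem.Dict.getD_eq_get?_getD]
  cases hg : d.get? k
  · simpa using PySem.Dict.nodup_keys_empty (κ := String) (ν := Int)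
  · rename_i s
    exact h.2 s (List.mem_map_of_mem (PySem.Dict.mem_items_of_get?_eq_some d hg))

theorem rawA_eq_normA (d : DD) (c : String × String × Bool) (h : DInv d) :
    rawA d c = normA d c := by
  rcases c with ⟨a, v, t⟩
  unfold rawA normA innerA
  dsimp only
  cases hc : (d.getD a PySem.Dict.empty).contains v
  · cases t
    · simp only [Bool.false_eq_true, if_false]
    · simp only [Bool.false_eq_true, if_false, if_true]
      rw [PySem.Dict.getD_insert_self, PySem.Dict.insert_insert_self]
  · cases t
    · simp only [Bool.false_eq_true, if_false, if_true]
      have hca : d.contains a = true := by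
        by_contra hna
        rw [PySem.Dict.getD_of_not_contains _ _ (by simpa using hna)] at hc
        simp [PySem.Dict.contains_empty] at hc
      exact (insert_getD_self_of_contains d a PySem.Dict.empty hca h.1).symm
    · simp only [if_true]

theorem DInv_normA (d : DD) (c : String × String × Bool) (h : DInv d) :
    DInv (normA d c) := by
  constructor
  · exact PySem.Dict.nodup_keys_insert _ _ _ h.1
  · intro s hs
    rcases PySem.Dict.mem_values_insert _ _ _ _ hs with rfl | hm
    · exact innerA_nodup _ _ (getD_nodup h c.1)
    · exact h.2 s hm

theorem fold_rawA_eq_normA :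
    ∀ (cells : List (String × String × Bool)) (d : DD), DInv d →
      cells.foldl rawA d = cells.foldl normA d := by
  intro cells
  induction cells with
  | nil => intro d _; rfl
  | cons c cs ih =>
      intro d h
      simp only [List.foldl_cons]
      rw [rawA_eq_normA d c h]
      exact ih (normA d c) (DInv_normA d c h)

-- the items of an always-insert fold over cells whose keys all exist: each entry evolves
-- independently by the cells that name its key
theorem items_fold_norm (g : PySem.Dict String Int → String × Bool → PySem.Dict String Int) :
    ∀ (cells : List (String × String × Bool)) (d : DD), d.keys.Nodup →
      (∀ c ∈ cells, d.contains c.1 = true) →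
      (cells.foldl (fun d c => d.insert c.1 (g (d.getD c.1 PySem.Dict.empty) c.2)) d).items
        = d.items.map (fun p =>
            (p.1, cells.foldl (fun s c => if c.1 == p.1 then g s c.2 else s) p.2)) := by
  intro cells
  induction cells with
  | nil =>
      intro d _ _
      simp
  | cons c cs ih =>
      intro d hnd hmem
      simp only [List.foldl_cons]
      rw [ih (d.insert c.1 (g (d.getD c.1 PySem.Dict.empty) c.2))
            (PySem.Dict.nodup_keys_insert _ _ _ hnd)
            (by
              intro c' hc'
              rw [PySem.Dict.contains_insert]
              rw [hmem c' (List.mem_cons_of_mem _ hc')]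
              simp),
          PySem.Dict.items_insert_of_contains _ _ (hmem c (List.mem_cons_self)),
          List.map_map]
      apply List.map_congr_left
      intro p hp
      simp only [Function.comp_apply]
      by_cases hk : p.1 = c.1
      · have hg : d.getD c.1 PySem.Dict.empty = p.2 := by
          rw [← hk]
          exact PySem.Dict.getD_of_mem_items d (by simpa using hp) hnd _
        simp [hk, hg]
      · simp [hk, Ne.symm hk]

-- a fold inserting f(key) at each key keeps every entry's value equal to f of its key
theorem values_foldl_insert {ν : Type} (f : String → ν) :
    ∀ (xs : List String) (d : PySem.Dict String ν),
      (∀ p ∈ d.items, p.2 = f p.1) →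
      ∀ p ∈ (xs.foldl (fun d a => d.insert a (f a)) d).items, p.2 = f p.1 := by
  intro xs
  induction xs with
  | nil => intro d h; exact h
  | cons a as ih =>
      intro d h
      simp only [List.foldl_cons]
      apply ih
      intro p hp
      rcases (PySem.Dict.mem_items_insert _ _ _ _).1 hp with rfl | ⟨hm, _⟩
      · rfl
      · exact h p hm

-- the filtered per-attribute folds of A's and B's inner actions agree
theorem filt_fold_eq (k : String) :
    ∀ (cells : List (String × String × Bool)) (s : PySem.Dict String Int), s.keys.Nodup →
      cells.foldl (fun s c => if c.1 == k then innerA s c.2 else s) s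
        = cells.foldl (fun s c => if c.1 == k then innerB s c.2 else s) s := by
  intro cells
  induction cells with
  | nil => intro s _; rfl
  | cons c cs ih =>
      intro s hnd
      simp only [List.foldl_cons]
      by_cases hk : c.1 = k
      · rw [if_pos (by simpa using hk), if_pos (by simpa using hk), inner_eq s c.2 hnd]
        exact ih _ (by unfold innerB; exact PySem.Dict.nodup_keys_insert _ _ _ hnd)
      · rw [if_neg (by simpa using hk), if_neg (by simpa using hk)]
        exact ih _ hnd

theorem foldl_flatMap_eq {al be si : Type} (l : List al) (f : al → List be)
    (g : si → be → si) : ∀ (a : si), (l.flatMap f).foldl g a = l.foldl (fun a x => (f x).foldl g a) a := by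
  induction l with
  | nil => intro a; rfl
  | cons x xs ih => intro a; simp only [List.flatMap_cons, List.foldl_append, List.foldl_cons]; exact ih _

theorem count_eq_alt (name value : List (List String)) (target_label : String)
    (labels : List String) (hpre : Pre_count name value target_label labels) :
    count name value target_label labels = count_alt name value target_label labels := by
  classical
  set cells := countCells name value target_label labels with hcells
  set d0 : DD := (PySem.List.pyGetD name 0 []).foldl
    (fun d att => d.insert att PySem.Dict.empty) PySem.Dict.empty with hd0
  -- A's nested fold is the flat fold of rawA over cells
  have hAfold : count name value target_label labels
      = ((cells.foldl rawA d0).items).map (fun q => (q.1, q.2.items)) := by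
    unfold count
    rw [hcells]
    unfold countCells
    rw [foldl_flatMap_eq]
    dsimp only
    congr 2
    congr 1
    funext d p
    rw [List.foldl_map]
    rfl
  -- the initial dict: Nodup keys, all values empty
  have hnd0 : d0.keys.Nodup := by
    rw [hd0]
    exact PySem.Dict.nodup_keys_foldl_insert _ _ _ (PySem.Dict.nodup_keys_empty)
  have hval0 : ∀ p ∈ d0.items, p.2 = (PySem.Dict.empty : PySem.Dict String Int) := by
    rw [hd0]
    exact values_foldl_insert (fun _ => PySem.Dict.empty) _ _ (by simp [PySem.Dict.empty])
  have hinv0 : DInv d0 := by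
    refine ⟨hnd0, ?_⟩
    intro s hs
    rcases List.mem_map.1 hs with ⟨p, hp, hps⟩
    rw [← hps, hval0 p hp]
    exact PySem.Dict.nodup_keys_empty
  -- every cell's attribute is a key of d0 (this is where Pre_count is used)
  have hmem : ∀ c ∈ cells, d0.contains c.1 = true := by
    intro c hc
    rw [hcells] at hc
    unfold countCells at hc
    rcases List.mem_flatMap.1 hc with ⟨p, hp, hcp⟩
    rcases List.mem_map.1 hcp with ⟨col, hcol, hccol⟩
    have hp1 : p.1 ∈ PySem.List.pyRange 0 (0 + (labels.length : Int)) 1 := by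
      rw [← PySem.List.map_fst_enumerate labels 0]
      exact List.mem_map_of_mem hp
    rw [PySem.List.mem_pyRange_one] at hp1
    obtain ⟨hp1a, hp1b⟩ := hp1
    have hilt : p.1.toNat < labels.length := by omega
    obtain ⟨hin, _, hatt⟩ := hpre.2 p.1.toNat hilt
    have hrow : PySem.List.pyGetD name p.1 [] = name.getD p.1.toNat [] := by
      rw [PySem.List.pyGetD_eq_getElem _ _ hp1a (by exact_mod_cast (by omega : (p.1 : Int) < (name.length : Int)))]
      rw [List.getD_eq_getElem _ _ hin]
    rcases PySem.List.mem_pyRange_one.1 hcol with ⟨hcol0, hcollt⟩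
    have hattmem : c.1 ∈ name.getD p.1.toNat [] := by
      rw [← hccol]
      dsimp only
      rw [hrow]
      rw [PySem.List.pyGetD_eq_getElem _ _ hcol0 (by rw [hrow] at hcollt; exact_mod_cast hcollt)]
      exact List.getElem_mem _
    have hhead : c.1 ∈ name.headD [] := hatt c.1 hattmem
    rw [hd0]
    have hkeys := PySem.Dict.contains_iff_mem_keys
      (d := ((PySem.List.pyGetD name 0 []).foldl
        (fun d att => d.insert att (PySem.Dict.empty : PySem.Dict String Int)) PySem.Dict.empty))
      (k := c.1)
    rw [hkeys.2]
    rw [PySem.Dict.keys_foldl_insert]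
    rw [PySem.Set.mem_update]
    right
    have : PySem.List.pyGetD name 0 [] = name.headD [] := by
      cases name with
      | nil => exact absurd rfl hpre.1
      | cons h t => simp [PySem.List.pyGetD_zero]
    rw [this]
    exact hhead
  -- normalise A and split into per-attribute folds
  have hnorm : cells.foldl rawA d0 = cells.foldl normA d0 := fold_rawA_eq_normA cells d0 hinv0
  have hfoldnorm : cells.foldl normA d0
      = cells.foldl (fun d c => d.insert c.1 (innerA (d.getD c.1 PySem.Dict.empty) c.2)) d0 := rfl
  have hitemsA : (cells.foldl rawA d0).items
      = d0.items.map (fun p => (p.1, tally cells p.1)) := by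
    rw [hnorm, hfoldnorm, items_fold_norm innerA cells d0 hnd0 hmem]
    apply List.map_congr_left
    intro p hp
    rw [hval0 p hp]
    rw [filt_fold_eq p.1 cells PySem.Dict.empty (PySem.Dict.nodup_keys_empty)]
    rfl
  -- B's dict: every entry's value is the tally of its key, and its key list equals d0's
  set dB : DD := (PySem.List.pyGetD name 0 []).foldl
    (fun d att => d.insert att (tally cells att)) PySem.Dict.empty with hdB
  have hvalB : ∀ p ∈ dB.items, p.2 = tally cells p.1 := by
    rw [hdB]
    exact values_foldl_insert (tally cells) _ _ (by simp [PySem.Dict.empty])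
  have hkeysEq : d0.items.map Prod.fst = dB.items.map Prod.fst := by
    have h1 : d0.keys = dB.keys := by
      rw [hd0, hdB, PySem.Dict.keys_foldl_insert, PySem.Dict.keys_foldl_insert]
    simpa [PySem.Dict.keys] using h1
  have hitemsB : dB.items = dB.items.map (fun p => (p.1, tally cells p.1)) := by
    conv_lhs => rw [← List.map_id dB.items]
    apply List.map_congr_left
    intro p hp
    have := hvalB p hp
    simp only [id]
    exact Prod.ext rfl this
  have hAB : (cells.foldl rawA d0).items = dB.items := by
    rw [hitemsA, hitemsB]
    have e1 : d0.items.map (fun p => (p.1, tally cells p.1))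
        = (d0.items.map Prod.fst).map (fun k => (k, tally cells k)) := by
      rw [List.map_map]; rfl
    have e2 : dB.items.map (fun p => (p.1, tally cells p.1))
        = (dB.items.map Prod.fst).map (fun k => (k, tally cells k)) := by
      rw [List.map_map]; rfl
    rw [e1, e2, hkeysEq]
  rw [hAfold, hAB]
  rfl

-- ===== VERDICT (by name: the statement is the Claim_ definition above) =====
theorem count_spec : Claim_equal_count := by
  intro name value target_label labels _ hpre
  unfold Spec_count
  exact count_eq_alt name value target_label labels hpre
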